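-- pv_equiv track=rewrite | github.com/Pradas01/TFG | Propuesta 3 enrquicimiento NER/Transformers_ENT_alegias.py | extraer_vector_entidades
-- ===== SOURCE A (Python) =====
-- def extraer_vector_entidades(entidades):
--     vector = [0, 0, 0]  # [CHEM, ANAT, DISO]
--     for ent in entidades:
--         if ent["entity_group"] == "CHEM":
--             vector[0] = 1
--         elif ent["entity_group"] == "ANAT":
--             vector[1] = 1
--         elif ent["entity_group"] == "DISO":
--             vector[2] = 1
--     return vector
-- ===== SOURCE B (Python) =====
-- def extraer_vector_entidades(entidades):
--     # One staged scan per label: the vector is a comprehension over the three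
--     # labels, each entry decided by its own any() pass over the entities.
--     return [1 if any(ent["entity_group"] == g for ent in entidades) else 0
--             for g in ("CHEM", "ANAT", "DISO")]
-- ===== Notes on version B (the rewrite author's own statement) =====
-- stated objective: idiomatic
-- what changed: Replaces the single stateful pass that mutates per-index flags by a comprehension over the three labels, each flag computed by its own short-circuiting any() scan over the entities (staged per-label passes instead of one accumulator pass).
import Mathlib
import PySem

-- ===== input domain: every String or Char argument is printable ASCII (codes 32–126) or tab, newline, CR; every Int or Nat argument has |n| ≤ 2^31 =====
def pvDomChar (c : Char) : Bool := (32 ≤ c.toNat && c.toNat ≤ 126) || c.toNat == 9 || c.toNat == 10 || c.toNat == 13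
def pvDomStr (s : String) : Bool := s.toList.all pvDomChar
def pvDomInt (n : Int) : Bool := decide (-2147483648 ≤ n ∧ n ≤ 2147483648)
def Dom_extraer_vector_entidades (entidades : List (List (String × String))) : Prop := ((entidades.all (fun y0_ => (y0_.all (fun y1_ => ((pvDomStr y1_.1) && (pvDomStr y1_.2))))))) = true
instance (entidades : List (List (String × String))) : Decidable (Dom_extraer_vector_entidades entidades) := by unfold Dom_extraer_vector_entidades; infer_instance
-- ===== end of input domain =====

-- B builds the vector by a comprehension over the three labels, one any()-scan per label,
-- instead of A's single stateful pass mutating per-index flags. Return value only.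

-- ===== PORT A =====
-- ent["entity_group"]: first value under the key; "" only outside Pre_ (Python raises KeyError there).
def pvGrupo (ent : List (String × String)) : String :=
  (PySem.Dict.getD (PySem.Dict.mk ent) "entity_group" "")

def extraer_vector_entidades (entidades : List (List (String × String))) : List Int :=
  entidades.foldl (fun vector ent =>
    if pvGrupo ent = "CHEM" then PySem.List.pySetD vector 0 (1 : Int)
    else if pvGrupo ent = "ANAT" then PySem.List.pySetD vector 1 (1 : Int)
    else if pvGrupo ent = "DISO" then PySem.List.pySetD vector 2 (1 : Int)
    else vector) [0, 0, 0]

-- ===== PORT B =====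
def extraer_vector_entidades_alt (entidades : List (List (String × String))) : List Int :=
  (["CHEM", "ANAT", "DISO"] : List String).map
    (fun g => if entidades.any (fun ent => pvGrupo ent == g) then (1 : Int) else 0)

-- ===== PRECONDITION & SPEC =====
-- Pre_ excludes exactly the inputs where some dict lacks the key "entity_group": A raises KeyError there.
def Pre_extraer_vector_entidades (entidades : List (List (String × String))) : Prop :=
  (entidades.all (fun ent => ent.any (fun p => p.1 == "entity_group"))) = true
instance (entidades : List (List (String × String))) : Decidable (Pre_extraer_vector_entidades entidades) := by
  unfold Pre_extraer_vector_entidades; infer_instance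

def pvWitness_extraer_vector_entidades : (List (List (String × String))) :=
  [[("entity_group", "CHEM"), ("word", "aspirina")], [("entity_group", "DISO")]]

def Spec_extraer_vector_entidades (entidades : List (List (String × String))) (out : List Int) : Prop := out = extraer_vector_entidades_alt entidades
instance (entidades : List (List (String × String))) (out : List Int) : Decidable (Spec_extraer_vector_entidades entidades out) := by unfold Spec_extraer_vector_entidades; infer_instance

-- ===== CLAIM =====
def Claim_equal_extraer_vector_entidades : Prop := ∀ (entidades : List (List (String × String))), Dom_extraer_vector_entidades entidades → Pre_extraer_vector_entidades entidades → Spec_extraer_vector_entidades entidades (extraer_vector_entidades entidades)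

-- ===== LEMMAS AND PROOFS =====

lemma pySetD0 (c a d : Int) : PySem.List.pySetD [c, a, d] 0 (1 : Int) = [1, a, d] := rfl
lemma pySetD1 (c a d : Int) : PySem.List.pySetD [c, a, d] 1 (1 : Int) = [c, 1, d] := rfl
lemma pySetD2 (c a d : Int) : PySem.List.pySetD [c, a, d] 2 (1 : Int) = [c, a, 1] := rfl

-- Loop invariant for A's fold: starting from any 3-vector, the fold sets each slot iff its group occurs.
lemma foldA_inv (l : List (List (String × String))) : ∀ (c a d : Int),
    l.foldl (fun vector ent =>
      if pvGrupo ent = "CHEM" then PySem.List.pySetD vector 0 (1 : Int)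
      else if pvGrupo ent = "ANAT" then PySem.List.pySetD vector 1 (1 : Int)
      else if pvGrupo ent = "DISO" then PySem.List.pySetD vector 2 (1 : Int)
      else vector) [c, a, d]
    = [if l.any (fun ent => pvGrupo ent == "CHEM") then 1 else c,
       if l.any (fun ent => pvGrupo ent == "ANAT") then 1 else a,
       if l.any (fun ent => pvGrupo ent == "DISO") then 1 else d] := by
  induction l with
  | nil => intro c a d; simp
  | cons x xs ih =>
    intro c a d
    simp only [List.foldl_cons, List.any_cons]
    by_cases h1 : pvGrupo x = "CHEM"
    · rw [if_pos h1, pySetD0, ih]; simp [h1]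
    · rw [if_neg h1]
      by_cases h2 : pvGrupo x = "ANAT"
      · rw [if_pos h2, pySetD1, ih]; simp [h2]
      · rw [if_neg h2]
        by_cases h3 : pvGrupo x = "DISO"
        · rw [if_pos h3, pySetD2, ih]; simp [h3]
        · rw [if_neg h3, ih]; simp [h1, h2, h3]

-- ===== VERDICT =====
theorem extraer_vector_entidades_spec : Claim_equal_extraer_vector_entidades := by
  intro entidades _ _
  unfold Spec_extraer_vector_entidades extraer_vector_entidades extraer_vector_entidades_alt
  rw [foldA_inv]
  simp
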